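-- pv_equiv track=rewrite | github.com/Siryoos/FlightioCrawler | adapters/base_adapters/enhanced_international_adapter.py | _map_trip_type
-- ===== SOURCE A (Python) =====
-- def _map_trip_type(trip_type: str) -> str:
--     """Map trip type to site-specific values."""
--     mapping = {
--         'oneway': ['oneway', 'one-way', 'ow', '1'],
--         'roundtrip': ['roundtrip', 'round-trip', 'rt', '2'],
--         'multicity': ['multicity', 'multi-city', 'mc', '3']
--     }
--
--     trip_type_lower = trip_type.lower()
--     for key, values in mapping.items():
--         if trip_type_lower in values:
--             return key
--
--     return trip_type  # Return original if no mapping found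
-- ===== SOURCE B (Python) =====
-- _MAPPING = {
--     'oneway': ['oneway', 'one-way', 'ow', '1'],
--     'roundtrip': ['roundtrip', 'round-trip', 'rt', '2'],
--     'multicity': ['multicity', 'multi-city', 'mc', '3'],
-- }
--
--
-- def _build_trie():
--     """Compile the alias table once into a character trie (a DFA):
--     transitions keyed by (state, char), accepting states map to the canonical key."""
--     trans = {}
--     accept = {}
--     n = 1  # next fresh state; 0 is the root
--     for canonical, aliases in _MAPPING.items():
--         for alias in aliases:
--             q = 0
--             for ch in alias:
--                 r = trans.get((q, ch))
--                 if r is None: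
--                     r = n
--                     n += 1
--                     trans[(q, ch)] = r
--                 q = r
--             accept[q] = canonical
--     return trans, accept
--
--
-- _TRANS, _ACCEPT = _build_trie()
--
--
-- def _map_trip_type(trip_type: str) -> str:
--     """Map trip type to site-specific values by walking a character trie."""
--     q = 0
--     for ch in trip_type.lower():
--         q = _TRANS.get((q, ch), -1)
--         if q < 0:
--             return trip_type
--     return _ACCEPT.get(q, trip_type)
-- ===== Notes on version B (the rewrite author's own statement) =====
-- stated objective: alternative
-- what changed: Replaced A's per-key scan over alias lists with a character trie (DFA) compiled once from the table and walked one character at a time, returning the original string when the walk dies or ends in a non-accepting state.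
import Mathlib
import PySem

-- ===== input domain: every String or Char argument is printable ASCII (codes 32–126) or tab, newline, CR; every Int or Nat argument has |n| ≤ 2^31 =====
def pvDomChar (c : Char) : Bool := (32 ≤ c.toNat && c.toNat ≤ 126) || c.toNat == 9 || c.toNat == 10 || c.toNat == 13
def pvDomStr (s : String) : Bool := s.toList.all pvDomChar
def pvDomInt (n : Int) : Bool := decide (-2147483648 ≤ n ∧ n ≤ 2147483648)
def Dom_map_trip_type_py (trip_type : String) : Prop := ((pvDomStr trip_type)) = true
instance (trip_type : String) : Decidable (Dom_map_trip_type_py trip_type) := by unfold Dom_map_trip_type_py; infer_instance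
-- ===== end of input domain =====

set_option maxRecDepth 8192


-- B replaces A's per-key scan over alias lists with a character trie (DFA) compiled
-- once from the alias table and walked char by char; alternative algorithm, same behaviour.

-- ===== PORT A =====
-- the 'for key, values in mapping.items(): if trip_type_lower in values: return key' loop
def mapTripScan (items : List (String × List String)) (lower orig : String) : String :=
  match items with
  | [] => orig
  | (key, values) :: rest =>
      if values.contains lower then key else mapTripScan rest lower orig

def map_trip_type_py (trip_type : String) : String :=
  let mapping : List (String × List String) :=
    [("oneway", ["oneway", "one-way", "ow", "1"]),
     ("roundtrip", ["roundtrip", "round-trip", "rt", "2"]),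
     ("multicity", ["multicity", "multi-city", "mc", "3"])]
  let trip_type_lower := PySem.Str.lower trip_type
  mapTripScan mapping trip_type_lower trip_type

-- ===== PORT B =====
-- Source B's _MAPPING (iterated in insertion order by _build_trie)
def tripMapping : List (String × List String) :=
  [("oneway", ["oneway", "one-way", "ow", "1"]),
   ("roundtrip", ["roundtrip", "round-trip", "rt", "2"]),
   ("multicity", ["multicity", "multi-city", "mc", "3"])]

-- Source B's _build_trie(): fold the alias table into (transitions, accepting states, fresh counter)
def buildTrie : PySem.Dict (Int × Char) Int × PySem.Dict Int String :=
  let res :=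
    tripMapping.foldl
      (fun (st : PySem.Dict (Int × Char) Int × PySem.Dict Int String × Int) kv =>
        kv.2.foldl
          (fun st2 al =>
            let trans := st2.1
            let accept := st2.2.1
            let n := st2.2.2
            let fin :=
              al.toList.foldl
                (fun (cst : PySem.Dict (Int × Char) Int × Int × Int) ch =>
                  let tr := cst.1
                  let m := cst.2.1
                  let q := cst.2.2
                  match PySem.Dict.get? tr (q, ch) with
                  | some r => (tr, m, r)
                  | none => (tr.insert (q, ch) m, m + 1, m))
                (trans, n, 0)
            (fin.1, accept.insert fin.2.2 kv.1, fin.2.1))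
          st)
      (PySem.Dict.empty, PySem.Dict.empty, 1)
  (res.1, res.2.1)

def tripTrans : PySem.Dict (Int × Char) Int := buildTrie.1
def tripAccept : PySem.Dict Int String := buildTrie.2

-- the 'for ch in trip_type.lower(): q = _TRANS.get((q, ch), -1); if q < 0: return trip_type' loop
def trieWalk (q : Int) (cs : List Char) (trip : String) : String :=
  match cs with
  | [] => PySem.Dict.getD tripAccept q trip
  | c :: rest =>
      let r := PySem.Dict.getD tripTrans (q, c) (-1)
      if r < 0 then trip else trieWalk r rest trip

def map_trip_type_py_alt (trip_type : String) : String :=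
  trieWalk 0 (PySem.Str.lower trip_type).toList trip_type

-- ===== PRECONDITION & SPEC =====
def Spec_map_trip_type_py (trip_type : String) (out : String) : Prop := out = map_trip_type_py_alt trip_type
instance (trip_type : String) (out : String) : Decidable (Spec_map_trip_type_py trip_type out) := by unfold Spec_map_trip_type_py; infer_instance

-- ===== CLAIM (what is proved, stated in full; the proofs are below) =====
def Claim_equal_map_trip_type_py : Prop := ∀ (trip_type : String), Dom_map_trip_type_py trip_type → Spec_map_trip_type_py trip_type (map_trip_type_py trip_type)

-- ===== LEMMAS AND PROOFS =====

-- the transition table the builder produces, as a literal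
def trieTL : List ((Int × Char) × Int) :=
  [((0, 'o'), 1), ((1, 'n'), 2), ((2, 'e'), 3), ((3, 'w'), 4), ((4, 'a'), 5), ((5, 'y'), 6),
   ((3, '-'), 7), ((7, 'w'), 8), ((8, 'a'), 9), ((9, 'y'), 10), ((1, 'w'), 11), ((0, '1'), 12),
   ((0, 'r'), 13), ((13, 'o'), 14), ((14, 'u'), 15), ((15, 'n'), 16), ((16, 'd'), 17),
   ((17, 't'), 18), ((18, 'r'), 19), ((19, 'i'), 20), ((20, 'p'), 21), ((17, '-'), 22),
   ((22, 't'), 23), ((23, 'r'), 24), ((24, 'i'), 25), ((25, 'p'), 26), ((13, 't'), 27),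
   ((0, '2'), 28), ((0, 'm'), 29), ((29, 'u'), 30), ((30, 'l'), 31), ((31, 't'), 32),
   ((32, 'i'), 33), ((33, 'c'), 34), ((34, 'i'), 35), ((35, 't'), 36), ((36, 'y'), 37),
   ((33, '-'), 38), ((38, 'c'), 39), ((39, 'i'), 40), ((40, 't'), 41), ((41, 'y'), 42),
   ((29, 'c'), 43), ((0, '3'), 44)]

-- the accepting states the builder produces, as a literal
def trieAL : List (Int × String) :=
  [(6, "oneway"), (10, "oneway"), (11, "oneway"), (12, "oneway"),
   (21, "roundtrip"), (26, "roundtrip"), (27, "roundtrip"), (28, "roundtrip"),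
   (37, "multicity"), (42, "multicity"), (43, "multicity"), (44, "multicity")]

theorem tripTrans_eq : tripTrans = PySem.Dict.mk trieTL := by rfl
theorem tripAccept_eq : tripAccept = PySem.Dict.mk trieAL := by rfl

-- the unique character path from the root to each live trie state
def pathOf (q : Int) : Option (List Char) :=
  match q with
  | 0 => some []
  | 1 => some "o".toList
  | 2 => some "on".toList
  | 3 => some "one".toList
  | 4 => some "onew".toList
  | 5 => some "onewa".toList
  | 6 => some "oneway".toList
  | 7 => some "one-".toList
  | 8 => some "one-w".toList
  | 9 => some "one-wa".toList
  | 10 => some "one-way".toList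
  | 11 => some "ow".toList
  | 12 => some "1".toList
  | 13 => some "r".toList
  | 14 => some "ro".toList
  | 15 => some "rou".toList
  | 16 => some "roun".toList
  | 17 => some "round".toList
  | 18 => some "roundt".toList
  | 19 => some "roundtr".toList
  | 20 => some "roundtri".toList
  | 21 => some "roundtrip".toList
  | 22 => some "round-".toList
  | 23 => some "round-t".toList
  | 24 => some "round-tr".toList
  | 25 => some "round-tri".toList
  | 26 => some "round-trip".toList
  | 27 => some "rt".toList
  | 28 => some "2".toList
  | 29 => some "m".toList
  | 30 => some "mu".toList
  | 31 => some "mul".toList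
  | 32 => some "mult".toList
  | 33 => some "multi".toList
  | 34 => some "multic".toList
  | 35 => some "multici".toList
  | 36 => some "multicit".toList
  | 37 => some "multicity".toList
  | 38 => some "multi-".toList
  | 39 => some "multi-c".toList
  | 40 => some "multi-ci".toList
  | 41 => some "multi-cit".toList
  | 42 => some "multi-city".toList
  | 43 => some "mc".toList
  | 44 => some "3".toList
  | _ => none

-- every transition extends the source state's path by its character
theorem trie_step_path : ∀ p ∈ trieTL, pathOf p.2 = (pathOf p.1.1).map (fun l => l ++ [p.1.2]) := by
  decide

-- every accepting state's path spells one of the twelve aliases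
theorem trie_accept_path :
    ∀ p ∈ trieAL,
      pathOf p.1 = some "oneway".toList ∨ pathOf p.1 = some "one-way".toList ∨
      pathOf p.1 = some "ow".toList ∨ pathOf p.1 = some "1".toList ∨
      pathOf p.1 = some "roundtrip".toList ∨ pathOf p.1 = some "round-trip".toList ∨
      pathOf p.1 = some "rt".toList ∨ pathOf p.1 = some "2".toList ∨
      pathOf p.1 = some "multicity".toList ∨ pathOf p.1 = some "multi-city".toList ∨
      pathOf p.1 = some "mc".toList ∨ pathOf p.1 = some "3".toList := by
  decide

-- a walk from a live state either bails out with trip, or ends in a state whose path is p0 ++ cs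
theorem trieWalk_result (cs : List Char) :
    ∀ (q0 : Int) (p0 : List Char) (trip : String), pathOf q0 = some p0 →
      trieWalk q0 cs trip = trip ∨
      ∃ q, pathOf q = some (p0 ++ cs) ∧ trieWalk q0 cs trip = PySem.Dict.getD tripAccept q trip := by
  induction cs with
  | nil =>
      intro q0 p0 trip h
      exact Or.inr ⟨q0, by simpa using h, rfl⟩
  | cons c rest ih =>
      intro q0 p0 trip h
      by_cases hdead : PySem.Dict.getD tripTrans (q0, c) (-1) < 0
      · left; simp [trieWalk, hdead]
      · set r := PySem.Dict.getD tripTrans (q0, c) (-1) with hr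
        have hget : PySem.Dict.get? tripTrans (q0, c) = some r := by
          rw [PySem.Dict.getD_eq_get?_getD] at hr
          cases hg : PySem.Dict.get? tripTrans (q0, c) with
          | none => exfalso; rw [hg] at hr; simp at hr; omega
          | some v => rw [hg] at hr; simp at hr; rw [hr]
        have hmem : ((q0, c), r) ∈ trieTL := by
          have := PySem.Dict.mem_items_of_get?_eq_some _ hget
          rwa [tripTrans_eq] at this
        have hpath : pathOf r = some (p0 ++ [c]) := by
          have := trie_step_path ((q0, c), r) hmem
          simpa [h] using this
        rcases ih r (p0 ++ [c]) trip hpath with h1 | ⟨q, hq, hw⟩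
        · left; simp [trieWalk, hdead, ← hr, h1]
        · right
          refine ⟨q, by simpa using hq, ?_⟩
          simp [trieWalk, hdead, ← hr, hw]

-- core equivalence: the trie walk equals A's scan, for any lowered string and original
theorem core_eq (s trip : String) :
    trieWalk 0 s.toList trip =
      mapTripScan
        [("oneway", ["oneway", "one-way", "ow", "1"]),
         ("roundtrip", ["roundtrip", "round-trip", "rt", "2"]),
         ("multicity", ["multicity", "multi-city", "mc", "3"])] s trip := by
  by_cases h0 : s = "oneway"
  · subst h0; rfl
  by_cases h1 : s = "one-way"
  · subst h1; rfl
  by_cases h2 : s = "ow"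
  · subst h2; rfl
  by_cases h3 : s = "1"
  · subst h3; rfl
  by_cases h4 : s = "roundtrip"
  · subst h4; rfl
  by_cases h5 : s = "round-trip"
  · subst h5; rfl
  by_cases h6 : s = "rt"
  · subst h6; rfl
  by_cases h7 : s = "2"
  · subst h7; rfl
  by_cases h8 : s = "multicity"
  · subst h8; rfl
  by_cases h9 : s = "multi-city"
  · subst h9; rfl
  by_cases h10 : s = "mc"
  · subst h10; rfl
  by_cases h11 : s = "3"
  · subst h11; rfl
  -- no alias matches: A's scan falls through to trip
  have hA : mapTripScan
      [("oneway", ["oneway", "one-way", "ow", "1"]),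
       ("roundtrip", ["roundtrip", "round-trip", "rt", "2"]),
       ("multicity", ["multicity", "multi-city", "mc", "3"])] s trip = trip := by
    simp [mapTripScan, h0, h1, h2, h3, h4, h5, h6, h7, h8, h9, h10, h11]
  rw [hA]
  -- and the trie walk cannot end in an accepting state
  rcases trieWalk_result s.toList 0 [] trip rfl with hw | ⟨q, hq, hw⟩
  · exact hw
  rw [hw]
  simp only [List.nil_append] at hq
  cases hget : PySem.Dict.get? tripAccept q with
  | none => exact PySem.Dict.getD_of_get?_eq_none _ _ hget
  | some v =>
      exfalso
      have hmem : (q, v) ∈ trieAL := by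
        have := PySem.Dict.mem_items_of_get?_eq_some _ hget
        rwa [tripAccept_eq] at this
      have hlist := trie_accept_path (q, v) hmem
      have hsl : ∀ t : String, pathOf q = some t.toList → s = t := by
        intro t ht
        rw [hq] at ht
        have : s.toList = t.toList := by simpa using ht
        have := congrArg String.ofList this
        simpa using this
      rcases hlist with h | h | h | h | h | h | h | h | h | h | h | h
      · exact h0 (hsl _ h)
      · exact h1 (hsl _ h)
      · exact h2 (hsl _ h)
      · exact h3 (hsl _ h)
      · exact h4 (hsl _ h)
      · exact h5 (hsl _ h)
      · exact h6 (hsl _ h)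
      · exact h7 (hsl _ h)
      · exact h8 (hsl _ h)
      · exact h9 (hsl _ h)
      · exact h10 (hsl _ h)
      · exact h11 (hsl _ h)

-- ===== VERDICT (by name: the statement is the Claim_ definition above) =====
theorem map_trip_type_py_spec : Claim_equal_map_trip_type_py := by
  intro t _
  unfold Spec_map_trip_type_py map_trip_type_py map_trip_type_py_alt
  exact (core_eq (PySem.Str.lower t) t).symm
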